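-- pv_equiv track=rewrite | github.com/Sovik89/Scaler_inter_n_advanced | advanced_2dmatrix_sum_of_all_sub_matrix.py | solve
-- ===== SOURCE A (Python) =====
-- def solve(A):
--     n=len(A)
--
--     sums=0
--
--     for j in range(n):
--         for i in range(n):
--             topleft=(i+1)*(j+1)
--             bottomright=(n-i)*(n-j)
--             sums+=topleft*bottomright*A[i][j]
--
--     return sums
-- ===== SOURCE B (Python) =====
-- def solve(A):
--     # Brute-force enumeration of all submatrices using per-row prefix sums
--     # and a running sum over the bottom row, instead of A's closed-form weights.
--     n = len(A)
--     pref = []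
--     for i in range(n):
--         p = [0]
--         for j in range(n):
--             p.append(p[j] + A[i][j])
--         pref.append(p)
--     total = 0
--     for c1 in range(n):
--         for c2 in range(c1, n):
--             for r1 in range(n):
--                 s = 0
--                 for r2 in range(r1, n):
--                     s += pref[r2][c2 + 1] - pref[r2][c1]
--                     total += s
--     return total
-- ===== Notes on version B (the rewrite author's own statement) =====
-- stated objective: alternative
-- what changed: A computes the answer with a closed-form per-element weight (i+1)(j+1)(n-i)(n-j); B instead builds per-row prefix sums and brute-force enumerates every submatrix (all column pairs and row pairs, with a running sum over the bottom row), accumulating each submatrix's sum directly.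
import Mathlib
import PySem

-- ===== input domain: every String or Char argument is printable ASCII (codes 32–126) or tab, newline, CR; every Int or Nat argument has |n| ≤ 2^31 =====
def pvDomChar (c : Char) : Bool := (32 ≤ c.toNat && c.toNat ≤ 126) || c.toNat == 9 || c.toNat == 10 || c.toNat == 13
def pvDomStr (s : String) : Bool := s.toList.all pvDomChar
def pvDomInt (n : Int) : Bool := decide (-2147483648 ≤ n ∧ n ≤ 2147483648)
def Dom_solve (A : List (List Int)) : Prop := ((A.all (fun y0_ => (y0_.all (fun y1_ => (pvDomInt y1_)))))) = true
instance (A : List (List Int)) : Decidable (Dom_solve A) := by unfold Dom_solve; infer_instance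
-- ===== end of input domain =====

-- B replaces A's closed-form per-element weights by a brute-force enumeration of all
-- submatrices via per-row prefix sums and a running bottom-row sum (alternative, slower).

-- ===== PORT A =====
def solve (A : List (List Int)) : Int :=
  let n : Int := A.length
  (PySem.List.pyRange 0 n 1).foldl (fun sums j =>
    (PySem.List.pyRange 0 n 1).foldl (fun sums i =>
      sums + ((i + 1) * (j + 1)) * ((n - i) * (n - j)) *
        PySem.List.pyGetD (PySem.List.pyGetD A i []) j 0) sums) 0

-- ===== PORT B =====
def solve_alt (A : List (List Int)) : Int :=
  let n : Int := A.length
  let pref := (PySem.List.pyRange 0 n 1).foldl (fun pref i =>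
    let p := (PySem.List.pyRange 0 n 1).foldl (fun p j =>
      p ++ [PySem.List.pyGetD p j 0 +
            PySem.List.pyGetD (PySem.List.pyGetD A i []) j 0]) [(0 : Int)]
    pref ++ [p]) []
  (PySem.List.pyRange 0 n 1).foldl (fun total c1 =>
    (PySem.List.pyRange c1 n 1).foldl (fun total c2 =>
      (PySem.List.pyRange 0 n 1).foldl (fun total r1 =>
        ((PySem.List.pyRange r1 n 1).foldl (fun st r2 =>
          let s := st.1 +
            (PySem.List.pyGetD (PySem.List.pyGetD pref r2 []) (c2 + 1) 0 -
             PySem.List.pyGetD (PySem.List.pyGetD pref r2 []) c1 0)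
          (s, st.2 + s)) ((0 : Int), total)).2) total) total) 0

-- ===== PRECONDITION & SPEC =====
-- A indexes A[i][j] for all i, j < len(A): it raises IndexError iff some row is
-- shorter than the matrix height; exactly those inputs are excluded.
def Pre_solve (A : List (List Int)) : Prop := ∀ row ∈ A, A.length ≤ row.length
instance (A : List (List Int)) : Decidable (Pre_solve A) := by unfold Pre_solve; infer_instance

def pvWitness_solve : List (List Int) := [[1, 2], [3, 4]]

def Spec_solve (A : List (List Int)) (out : Int) : Prop := out = solve_alt A
instance (A : List (List Int)) (out : Int) : Decidable (Spec_solve A out) := by unfold Spec_solve; infer_instance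

-- ===== CLAIM (what is proved, stated in full; the proofs are below) =====
def Claim_equal_solve : Prop := ∀ (A : List (List Int)), Dom_solve A → Pre_solve A → Spec_solve A (solve A)

-- ===== LEMMAS AND PROOFS =====

-- matrix entry A[i][j] as both ports read it (getD with both defaults)
def gf (A : List (List Int)) (i j : Nat) : Int := (A.getD i []).getD j 0
-- row-prefix sum: pf A i c = sum of the first c entries of row i
def pf (A : List (List Int)) (i c : Nat) : Int := ∑ j ∈ Finset.range c, gf A i j
-- number of submatrix row-ranges [r1, r2] containing row i, as an Int
def cnt (n i : Nat) : Int := ((i : Int) + 1) * ((n : Int) - (i : Int))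
-- the value of B's prefix table pref after the build loop
def Ptab (A : List (List Int)) : List (List Int) :=
  (List.range A.length).map (fun i => (List.range (A.length + 1)).map (pf A i))

lemma sum_map_range (n : Nat) (f : Nat → Int) :
    ((List.range n).map f).sum = ∑ i ∈ Finset.range n, f i := rfl

lemma foldl_add_mem {β : Type} (l : List β) (f : Int → β → Int) (F : β → Int)
    (h : ∀ a : Int, ∀ x ∈ l, f a x = a + F x) (a : Int) :
    l.foldl f a = a + (l.map F).sum := by
  induction l generalizing a with
  | nil => simp
  | cons x t ih =>
      simp only [List.foldl_cons, List.map_cons, List.sum_cons]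
      rw [h a x (by simp), ih (fun b y hy => h b y (by simp [hy])) _]
      ring

lemma solve_eq_sum (A : List (List Int)) :
    solve A = ∑ j ∈ Finset.range A.length, ∑ i ∈ Finset.range A.length,
      (((i : Int) + 1) * ((j : Int) + 1)) *
        (((A.length : Int) - (i : Int)) * ((A.length : Int) - (j : Int))) * gf A i j := by
  unfold solve
  simp only []
  rw [PySem.List.pyRange_zero_nat, List.foldl_map]
  rw [foldl_add_mem _ _ (fun j : Nat => ∑ i ∈ Finset.range A.length,
        (((i : Int) + 1) * ((j : Int) + 1)) *
          (((A.length : Int) - (i : Int)) * ((A.length : Int) - (j : Int))) * gf A i j) ?_ 0]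
  · rw [sum_map_range]; ring
  · intro a j hj
    rw [List.foldl_map]
    rw [foldl_add_mem _ _ (fun i : Nat =>
        (((i : Int) + 1) * ((j : Int) + 1)) *
          (((A.length : Int) - (i : Int)) * ((A.length : Int) - (j : Int))) * gf A i j) ?_ a]
    · rw [sum_map_range]
    · intro b i hi
      simp [PySem.List.pyGetD_natCast, gf]

lemma row_build (A : List (List Int)) (i : Nat) (m : Nat) :
    (PySem.List.pyRange 0 (m : Int) 1).foldl
      (fun p j => p ++ [PySem.List.pyGetD p j 0 +
        PySem.List.pyGetD (PySem.List.pyGetD A (i : Int) []) j 0]) [(0 : Int)]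
    = (List.range (m + 1)).map (pf A i) := by
  induction m with
  | zero =>
      simp [PySem.List.pyRange_one_eq_nil (by norm_num : (0:Int) ≤ 0), pf]
  | succ m ih =>
      rw [show ((m + 1 : Nat) : Int) = ((m : Nat) : Int) + 1 by push_cast; ring]
      rw [PySem.List.pyRange_one_succ_right (by positivity)]
      rw [List.foldl_append, ih]
      simp only [List.foldl_cons, List.foldl_nil]
      rw [PySem.List.pyGetD_natCast, PySem.List.pyGetD_natCast,
          PySem.List.getD_map_range _ _ _ _ (by omega)]
      rw [List.range_succ (n := m + 1), List.map_append]
      congr 1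
      simp [pf, Finset.sum_range_succ, gf]

lemma row_build' (A : List (List Int)) (i : Nat) (m : Nat) :
    ((List.range m).map (fun k : Nat => (k : Int))).foldl
      (fun p j => p ++ [PySem.List.pyGetD p j 0 +
        PySem.List.pyGetD (PySem.List.pyGetD A (i : Int) []) j 0]) [(0 : Int)]
    = (List.range (m + 1)).map (pf A i) := by
  rw [← PySem.List.pyRange_zero_nat]; exact row_build A i m
lemma pref_eq (A : List (List Int)) :
    (PySem.List.pyRange 0 (A.length : Int) 1).foldl (fun pref i =>
      pref ++ [(PySem.List.pyRange 0 (A.length : Int) 1).foldl (fun p j =>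
        p ++ [PySem.List.pyGetD p j 0 +
              PySem.List.pyGetD (PySem.List.pyGetD A i []) j 0]) [(0 : Int)]]) []
    = Ptab A := by
  rw [PySem.List.pyRange_zero_nat, List.foldl_map,
      PySem.List.foldl_append_singleton_eq_map
        (f := fun k : Nat => ((List.range A.length).map (fun k : Nat => (k : Int))).foldl (fun p j =>
          p ++ [PySem.List.pyGetD p j 0 +
                PySem.List.pyGetD (PySem.List.pyGetD A (k : Int) []) j 0]) [(0 : Int)])]
  simp only [row_build', List.nil_append, Ptab]

lemma Ptab_get (A : List (List Int)) (i c : Nat) (hi : i < A.length) (hc : c ≤ A.length) :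
    PySem.List.pyGetD (PySem.List.pyGetD (Ptab A) (i : Int) []) (c : Int) 0 = pf A i c := by
  rw [PySem.List.pyGetD_natCast, PySem.List.pyGetD_natCast, Ptab,
      PySem.List.getD_map_range _ _ _ _ hi,
      PySem.List.getD_map_range _ _ _ _ (by omega)]

lemma pairloop (F : Int → Int) (r1 n : Nat) (h : r1 ≤ n) (s t : Int) :
    (PySem.List.pyRange (r1 : Int) (n : Int) 1).foldl
      (fun st x => (st.1 + F x, st.2 + (st.1 + F x))) (s, t)
    = (s + ∑ i ∈ Finset.Ico r1 n, F (i : Int),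
       t + ∑ r2 ∈ Finset.Ico r1 n, (s + ∑ i ∈ Finset.Icc r1 r2, F (i : Int))) := by
  induction n with
  | zero =>
      have : r1 = 0 := by omega
      subst this
      simp [PySem.List.pyRange_one_eq_nil (by norm_num : (0:Int) ≤ 0)]
  | succ n ih =>
      by_cases hr : r1 ≤ n
      · rw [show ((n + 1 : Nat) : Int) = ((n : Nat) : Int) + 1 by push_cast; ring]
        rw [PySem.List.pyRange_one_succ_right (by exact_mod_cast hr)]
        rw [List.foldl_append, ih hr]
        simp only [List.foldl_cons, List.foldl_nil]
        rw [Finset.sum_Ico_succ_top hr, Finset.sum_Ico_succ_top hr,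
            show Finset.Icc r1 n = Finset.Ico r1 (n + 1) from (Finset.Ico_add_one_right_eq_Icc r1 n).symm,
            Finset.sum_Ico_succ_top (by omega)]
        refine Prod.ext ?_ ?_ <;> simp only [] <;> ring
      · have hr1 : r1 = n + 1 := by omega
        subst hr1
        rw [PySem.List.pyRange_one_eq_nil (by omega)]
        simp

lemma L_row (n : Nat) (h : Nat → Int) :
    ∑ r1 ∈ Finset.range n, ∑ r2 ∈ Finset.Ico r1 n, ∑ i ∈ Finset.Icc r1 r2, h i
    = ∑ i ∈ Finset.range n, cnt n i * h i := by
  have step1 : ∀ r1 r2 : Nat, r2 < n →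
      ∑ i ∈ Finset.Icc r1 r2, h i
      = ∑ i ∈ Finset.range n, if r1 ≤ i ∧ i ≤ r2 then h i else 0 := by
    intro r1 r2 hr2
    rw [show Finset.Icc r1 r2 = (Finset.range n).filter (fun i => r1 ≤ i ∧ i ≤ r2) by
          ext x; simp; omega,
        Finset.sum_filter]
  calc
    ∑ r1 ∈ Finset.range n, ∑ r2 ∈ Finset.Ico r1 n, ∑ i ∈ Finset.Icc r1 r2, h i
        = ∑ r1 ∈ Finset.range n, ∑ r2 ∈ Finset.Ico r1 n, ∑ i ∈ Finset.range n,
            if r1 ≤ i ∧ i ≤ r2 then h i else 0 := by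
          refine Finset.sum_congr rfl fun r1 _ => Finset.sum_congr rfl fun r2 hr2 => ?_
          exact step1 r1 r2 (Finset.mem_Ico.mp hr2).2
    _ = ∑ i ∈ Finset.range n, ∑ r1 ∈ Finset.range n, ∑ r2 ∈ Finset.Ico r1 n,
            if r1 ≤ i ∧ i ≤ r2 then h i else 0 := by
          rw [Finset.sum_comm]
          exact Finset.sum_congr rfl fun r1 _ => Finset.sum_comm
    _ = ∑ i ∈ Finset.range n, cnt n i * h i := by
          refine Finset.sum_congr rfl fun i hi => ?_
          have hi' : i < n := Finset.mem_range.mp hi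
          have inner : ∀ r1 : Nat, ∑ r2 ∈ Finset.Ico r1 n, (if r1 ≤ i ∧ i ≤ r2 then h i else 0)
              = if r1 ≤ i then ((n - i : Nat) : Int) * h i else 0 := by
            intro r1
            by_cases hr : r1 ≤ i
            · rw [if_pos hr]
              have : ∀ r2 ∈ Finset.Ico r1 n, (if r1 ≤ i ∧ i ≤ r2 then h i else 0)
                  = if i ≤ r2 then h i else 0 := by
                intro r2 _; by_cases hir : i ≤ r2 <;> simp [hir, hr]
              rw [Finset.sum_congr rfl this, ← Finset.sum_filter,
                  show (Finset.Ico r1 n).filter (fun r2 => i ≤ r2) = Finset.Ico i n by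
                    ext x; simp; omega,
                  Finset.sum_const, Nat.card_Ico, nsmul_eq_mul]
            · rw [if_neg hr]
              refine Finset.sum_eq_zero fun r2 _ => ?_
              simp [hr]
          rw [Finset.sum_congr rfl (fun r1 _ => inner r1), ← Finset.sum_filter,
              show (Finset.range n).filter (fun r1 => r1 ≤ i) = Finset.range (i + 1) by
                ext x; simp; omega,
              Finset.sum_const, Finset.card_range, nsmul_eq_mul]
          have : ((n - i : Nat) : Int) = (n : Int) - (i : Int) := by
            push_cast [Nat.cast_sub (le_of_lt hi')]; ring
          rw [this, cnt]; push_cast; ring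

lemma main_count (n : Nat) (g : Nat → Nat → Int) :
    ∑ c1 ∈ Finset.range n, ∑ c2 ∈ Finset.Ico c1 n, ∑ r1 ∈ Finset.range n,
      ∑ r2 ∈ Finset.Ico r1 n, ∑ i ∈ Finset.Icc r1 r2, ∑ j ∈ Finset.Icc c1 c2, g i j
    = ∑ j ∈ Finset.range n, ∑ i ∈ Finset.range n,
        (((i : Int) + 1) * ((j : Int) + 1)) *
          (((n : Int) - (i : Int)) * ((n : Int) - (j : Int))) * g i j := by
  calc
    ∑ c1 ∈ Finset.range n, ∑ c2 ∈ Finset.Ico c1 n, ∑ r1 ∈ Finset.range n,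
      ∑ r2 ∈ Finset.Ico r1 n, ∑ i ∈ Finset.Icc r1 r2, ∑ j ∈ Finset.Icc c1 c2, g i j
        = ∑ c1 ∈ Finset.range n, ∑ c2 ∈ Finset.Ico c1 n, ∑ i ∈ Finset.range n,
            cnt n i * ∑ j ∈ Finset.Icc c1 c2, g i j := by
          exact Finset.sum_congr rfl fun c1 _ => Finset.sum_congr rfl fun c2 _ =>
            L_row n (fun i => ∑ j ∈ Finset.Icc c1 c2, g i j)
    _ = ∑ i ∈ Finset.range n, ∑ c1 ∈ Finset.range n, ∑ c2 ∈ Finset.Ico c1 n,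
            cnt n i * ∑ j ∈ Finset.Icc c1 c2, g i j := by
          rw [Finset.sum_comm]
          exact Finset.sum_congr rfl fun c1 _ => Finset.sum_comm
    _ = ∑ i ∈ Finset.range n, cnt n i *
            ∑ c1 ∈ Finset.range n, ∑ c2 ∈ Finset.Ico c1 n, ∑ j ∈ Finset.Icc c1 c2, g i j := by
          refine Finset.sum_congr rfl fun i _ => ?_
          rw [Finset.mul_sum]
          exact Finset.sum_congr rfl fun c1 _ => (Finset.mul_sum _ _ _).symm
    _ = ∑ i ∈ Finset.range n, cnt n i * ∑ j ∈ Finset.range n, cnt n j * g i j := by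
          refine Finset.sum_congr rfl fun i _ => ?_
          rw [L_row n (fun j => g i j)]
    _ = ∑ j ∈ Finset.range n, ∑ i ∈ Finset.range n,
          (((i : Int) + 1) * ((j : Int) + 1)) *
            (((n : Int) - (i : Int)) * ((n : Int) - (j : Int))) * g i j := by
          simp only [Finset.mul_sum]
          rw [Finset.sum_comm]
          refine Finset.sum_congr rfl fun j _ => Finset.sum_congr rfl fun i _ => ?_
          rw [cnt, cnt]; ring

lemma solve_alt_eq_sum (A : List (List Int)) :
    solve_alt A = ∑ c1 ∈ Finset.range A.length, ∑ c2 ∈ Finset.Ico c1 A.length,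
      ∑ r1 ∈ Finset.range A.length, ∑ r2 ∈ Finset.Ico r1 A.length,
        ∑ i ∈ Finset.Icc r1 r2, ∑ j ∈ Finset.Icc c1 c2, gf A i j := by
  unfold solve_alt
  simp only []
  rw [pref_eq]
  rw [PySem.List.pyRange_zero_nat, List.foldl_map]
  rw [foldl_add_mem _ _ (F := fun c1 : Nat => ∑ c2 ∈ Finset.Ico c1 A.length,
        ∑ r1 ∈ Finset.range A.length, ∑ r2 ∈ Finset.Ico r1 A.length,
          ∑ i ∈ Finset.Icc r1 r2, ∑ j ∈ Finset.Icc c1 c2, gf A i j) ?_ 0]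
  · rw [sum_map_range]; ring
  · intro a c1 hc1
    have hc1' : c1 < A.length := List.mem_range.mp hc1
    rw [PySem.List.pyRange_one, show (((A.length : Nat) : Int) - (c1 : Int)).toNat
          = A.length - c1 by omega, List.foldl_map]
    rw [foldl_add_mem _ _ (F := fun k : Nat =>
          ∑ r1 ∈ Finset.range A.length, ∑ r2 ∈ Finset.Ico r1 A.length,
            ∑ i ∈ Finset.Icc r1 r2, ∑ j ∈ Finset.Icc c1 (c1 + k), gf A i j) ?_ a]
    · beta_reduce
      rw [sum_map_range, Finset.sum_Ico_eq_sum_range]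
    · intro b k hk
      have hk' : k < A.length - c1 := List.mem_range.mp hk
      rw [List.foldl_map]
      rw [foldl_add_mem _ _ (F := fun r1 : Nat => ∑ r2 ∈ Finset.Ico r1 A.length,
            ∑ i ∈ Finset.Icc r1 r2, ∑ j ∈ Finset.Icc c1 (c1 + k), gf A i j) ?_ b]
      · rw [sum_map_range]
      · intro c r1 hr1
        have hr1' : r1 < A.length := List.mem_range.mp hr1
        rw [pairloop (F := fun x => PySem.List.pyGetD (PySem.List.pyGetD (Ptab A) x []) ((c1 : Int) + (k : Int) + 1) 0 -
              PySem.List.pyGetD (PySem.List.pyGetD (Ptab A) x []) (c1 : Int) 0) r1 A.length (le_of_lt hr1') 0 c]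
        simp only []
        congr 1
        refine Finset.sum_congr rfl fun r2 hr2 => ?_
        have hr2' : r2 < A.length := (Finset.mem_Ico.mp hr2).2
        rw [zero_add]
        refine Finset.sum_congr rfl fun i hi => ?_
        have hi' : i < A.length := lt_of_le_of_lt (Finset.mem_Icc.mp hi).2 hr2'
        rw [show ((c1 : Int) + (k : Int) + 1) = ((c1 + k + 1 : Nat) : Int) by push_cast; ring,
            Ptab_get A i (c1 + k + 1) hi' (by omega),
            Ptab_get A i c1 hi' (by omega),
            ← Finset.Ico_add_one_right_eq_Icc,
            Finset.sum_Ico_eq_sub _ (show c1 ≤ c1 + k + 1 by omega)]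
        simp [pf]

-- ===== VERDICT (by name: the statement is the Claim_ definition above) =====
theorem solve_spec : Claim_equal_solve := by
  intro A _ _
  unfold Spec_solve
  rw [solve_eq_sum, solve_alt_eq_sum, main_count]
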